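-- pv_equiv track=rewrite | github.com/StonePardon/homework | task2/time_to_say_goodbye.py | new_time
-- ===== SOURCE A (Python) =====
-- class Graph:
--     def __init__(self, x):
--         self.array = {}
--         self.ribs = x
--         self.point = []
--         for pair in x:
--             if pair[0] not in self.array:
--                 self.array[pair[0]] = []
--             self.array[pair[0]].append(pair[1])
--             if pair[1] not in self.array:
--                 self.array[pair[1]] = []
--             self.array[pair[1]].append(pair[0])
--             if pair[0] not in self.point:
--                 self.point.append(pair[0])
--             if pair[1] not in self.point:
--                 self.point.append(pair[1])
--
--     def dfs_paths(self, start, last):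
--         stack = [(start, [start])]  # (node, path)
--         while stack:
--             (node, path) = stack.pop()
--             for next in set(self.array[node]) - set(path):
--                 if next == last:
--                     yield path + [next]
--                 else:
--                     stack.append((next, path + [next]))
--
--     def short_path(self, start, last):
--         all_path = list(self.dfs_paths(start, last))
--         if all_path == []:
--             return -1
--         weight = []
--         ribss = []
--         for pair in self.ribs:
--             ribss.append([pair[1], pair[0]])
--             ribss.append([pair[0], pair[1]])
--             weight.append(pair[2])
--             weight.append(pair[2])
--         min_p = []
--         path_index = int(0)
--         for path in all_path:
--             i = 0
--             min_p.append(0)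
--             while i < len(path) - 1:
--                 index = ribss.index([path[i], path[i+1]])
--                 min_p[path_index] += weight[index]
--                 i += 1
--             path_index += 1
--         ans = min_p[0]
--         for i in range(len(min_p)):
--             if ans > min_p[i]:
--                 ans = min_p[i]
--         return ans
--
-- def new_time(time, num, point):
--     my_list = Graph(time)
--     flag = 0
--     for i in my_list.point:
--         if i == point:
--             flag = 1
--     if flag == 0:
--         return -1
--     ans = 0
--     for i in range(N):
--         tmp = my_list.short_path(point, i)
--         if tmp > 0:
--             ans = ans + tmp
--     return ans
--
-- N = 4
-- ===== SOURCE B (Python) =====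
-- N = 4
--
-- def new_time(time, num, point):
--     # Build adjacency (deduped neighbor lists) and a first-wins weight table once.
--     adj = {}
--     w = {}
--     for e in time:
--         u, v, c = e[0], e[1], e[2]
--         adj.setdefault(u, [])
--         adj.setdefault(v, [])
--         if v not in adj[u]:
--             adj[u].append(v)
--         if u not in adj[v]:
--             adj[v].append(u)
--         w.setdefault((v, u), c)
--         w.setdefault((u, v), c)
--     if point not in adj:
--         return -1
--     total = 0
--     for target in range(N):
--         best = None
--         stack = [(point, [point], 0)]
--         while stack:
--             node, seen, cost = stack.pop()
--             for nxt in adj[node]: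
--                 if nxt in seen:
--                     continue
--                 c2 = cost + w[(node, nxt)]
--                 if nxt == target:
--                     if best is None or c2 < best:
--                         best = c2
--                 else:
--                     stack.append((nxt, seen + [nxt], c2))
--         if best is not None and best > 0:
--             total += best
--     return total
-- ===== Notes on version B (the rewrite author's own statement) =====
-- stated objective: alternative
-- what changed: A enumerates all simple paths per target, then scores each path by rescanning a rebuilt ribss list with list.index per step and takes the minimum in a separate pass; B builds a neighbour/weight dict once and runs a single fused DFS per target that accumulates path cost on the stack and keeps a running minimum, never materialising paths or scanning edge lists.
-- outside the precondition, e.g. on new_time([[1, 2]], 0, 5): A returns -1, B raises IndexError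
import Mathlib
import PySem

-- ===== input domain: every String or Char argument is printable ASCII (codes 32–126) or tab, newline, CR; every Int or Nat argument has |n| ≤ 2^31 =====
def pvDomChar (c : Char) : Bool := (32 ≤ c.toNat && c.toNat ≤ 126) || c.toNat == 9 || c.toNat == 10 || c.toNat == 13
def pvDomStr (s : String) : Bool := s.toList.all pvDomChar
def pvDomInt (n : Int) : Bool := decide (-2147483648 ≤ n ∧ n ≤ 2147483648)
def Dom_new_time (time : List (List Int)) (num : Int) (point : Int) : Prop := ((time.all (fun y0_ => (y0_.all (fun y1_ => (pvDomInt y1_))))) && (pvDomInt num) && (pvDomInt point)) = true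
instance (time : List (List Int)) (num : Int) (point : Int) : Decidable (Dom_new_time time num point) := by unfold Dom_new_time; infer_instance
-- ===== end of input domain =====

-- B replaces A's enumerate-all-paths-then-score-via-ribss.index design by a single DFS per
-- target that accumulates path weights from a dict built once and keeps a running minimum.

-- ===== PORT A =====
-- Graph.__init__: self.array (adjacency dict, lists with duplicates) and self.point
-- (list of endpoints, first occurrence order).  pair[0]/pair[1] are written with
-- PySem.List.pyGetD; under Pre_ (rows of length ≥ 3) they are exactly Python's pair[i].
def aStepEdge (st : PySem.Dict Int (List Int) × List Int) (pair : List Int) :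
    PySem.Dict Int (List Int) × List Int :=
    let p0 := PySem.List.pyGetD pair 0 0
    let p1 := PySem.List.pyGetD pair 1 0
    let ar1 := if st.1.contains p0 then st.1 else st.1.insert p0 []
    let ar2 := ar1.insert p0 (ar1.getD p0 [] ++ [p1])
    let ar3 := if ar2.contains p1 then ar2 else ar2.insert p1 []
    let ar4 := ar3.insert p1 (ar3.getD p1 [] ++ [p0])
    let pts1 := if st.2.contains p0 then st.2 else st.2 ++ [p0]
    let pts2 := if pts1.contains p1 then pts1 else pts1 ++ [p1]
    (ar4, pts2)

def aBuild (time : List (List Int)) : PySem.Dict Int (List Int) × List Int :=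
  time.foldl aStepEdge (PySem.Dict.empty, [])

-- dfs_paths + list(...): the while-stack loop; stack.pop() takes the last element, the
-- yielded complete paths are collected into acc.  Python iterates the set difference in
-- hash order, which only permutes the collected list; the returned minimum is unaffected.
-- fuel is a totality device only (Python's loop always terminates; callers pass enough).
def aDfs (ar : PySem.Dict Int (List Int)) (last : Int) :
    Nat → List (Int × List Int) → List (List Int) → List (List Int)
  | 0, _, acc => acc
  | fuel+1, stack, acc =>
    match stack.getLast? with
    | none => acc
    | some np =>
      let rest := stack.dropLast
      let nbrs := PySem.Set.diff (PySem.Set.ofList (ar.getD np.1 [])) (PySem.Set.ofList np.2)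
      let sa := nbrs.foldl (fun sa nxt =>
          if nxt == last then (sa.1, sa.2 ++ [np.2 ++ [nxt]])
          else (sa.1 ++ [(nxt, np.2 ++ [nxt])], sa.2)) (rest, acc)
      aDfs ar last fuel sa.1 sa.2

-- weight[ribss.index([u, v])].  ribss.index would raise ValueError on a missing pair,
-- but every consecutive pair of a DFS path is an adjacency, hence present; the none
-- branch is unreachable in any call the ports make.
def aScoreStep (ribss : List (List Int)) (weight : List Int) (u v : Int) : Int :=
  match PySem.List.index? ribss [u, v] with
  | some j => PySem.List.pyGetD weight (j : Int) 0
  | none => 0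

-- the ribss/weight tables short_path rebuilds from self.ribs
def aRibs (time : List (List Int)) : List (List Int) × List Int :=
  time.foldl (fun rw pair =>
    let p0 := PySem.List.pyGetD pair 0 0
    let p1 := PySem.List.pyGetD pair 1 0
    let p2 := PySem.List.pyGetD pair 2 0
    (rw.1 ++ [[p1, p0], [p0, p1]], rw.2 ++ [p2, p2]))
    ([], [])

-- the inner while loop of short_path: sum the step weights along one path
def aScore (ribss : List (List Int)) (weight : List Int) (path : List Int) : Int :=
  (PySem.List.pyRange 0 (PySem.List.len path - 1)).foldl
    (fun s i => s + aScoreStep ribss weight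
        (PySem.List.pyGetD path i 0) (PySem.List.pyGetD path (i + 1) 0)) 0

def aShortPath (time : List (List Int)) (ar : PySem.Dict Int (List Int)) (fuel : Nat)
    (start last : Int) : Int :=
  let allPath := aDfs ar last fuel [(start, [start])] []
  if allPath = [] then -1
  else
    let rw := aRibs time
    let min_p := allPath.foldl (fun mp path => mp ++ [aScore rw.1 rw.2 path]) []
    let ans := PySem.List.pyGetD min_p 0 0
    (PySem.List.pyRange 0 (PySem.List.len min_p)).foldl
      (fun a i => if a > PySem.List.pyGetD min_p i 0 then PySem.List.pyGetD min_p i 0 else a) ans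

def new_time (time : List (List Int)) (num : Int) (point : Int) : Int :=
  let g := aBuild time
  let flag := g.2.foldl (fun fl i => if i == point then (1 : Int) else fl) 0
  if flag = 0 then -1
  else
    let fuel := (g.2.length + 1) ^ (g.2.length + 1)
    (PySem.List.pyRange 0 4).foldl (fun ans i =>
      let tmp := aShortPath time g.1 fuel point i
      if tmp > 0 then ans + tmp else ans) 0

-- ===== PORT B =====
-- build both tables in one pass: adj = deduplicated neighbour lists, w = first-wins
-- weight per directed pair (dict.setdefault).  e[i] via pyGetD as in port A.
def bStepEdge (st : PySem.Dict Int (List Int) × PySem.Dict (Int × Int) Int) (e : List Int) :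
    PySem.Dict Int (List Int) × PySem.Dict (Int × Int) Int :=
    let u := PySem.List.pyGetD e 0 0
    let v := PySem.List.pyGetD e 1 0
    let c := PySem.List.pyGetD e 2 0
    let adj1 := st.1.setdefault u []
    let adj2 := adj1.setdefault v []
    let adj3 := if (adj2.getD u []).contains v then adj2 else adj2.insert u (adj2.getD u [] ++ [v])
    let adj4 := if (adj3.getD v []).contains u then adj3 else adj3.insert v (adj3.getD v [] ++ [u])
    let w1 := st.2.setdefault (v, u) c
    let w2 := w1.setdefault (u, v) c
    (adj4, w2)

def bBuild (time : List (List Int)) :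
    PySem.Dict Int (List Int) × PySem.Dict (Int × Int) Int :=
  time.foldl bStepEdge (PySem.Dict.empty, PySem.Dict.empty)

-- the fused while-stack loop: stack entries carry (node, seen, accumulated cost), best is
-- the running minimum.  w[(node, nxt)] is ported as getD; the key is always present since
-- nxt is a neighbour of node.  fuel as in port A.
def bDfs (adj : PySem.Dict Int (List Int)) (w : PySem.Dict (Int × Int) Int) (target : Int) :
    Nat → List (Int × List Int × Int) → Option Int → Option Int
  | 0, _, best => best
  | fuel+1, stack, best =>
    match stack.getLast? with
    | none => best
    | some e =>
      let rest := stack.dropLast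
      let sb := (adj.getD e.1 []).foldl (fun sb nxt =>
          if e.2.1.contains nxt then sb
          else
            let c2 := e.2.2 + w.getD (e.1, nxt) 0
            if nxt == target then
              (sb.1, some (match sb.2 with | none => c2 | some b0 => if c2 < b0 then c2 else b0))
            else (sb.1 ++ [(nxt, e.2.1 ++ [nxt], c2)], sb.2)) (rest, best)
      bDfs adj w target fuel sb.1 sb.2

def new_time_alt (time : List (List Int)) (num : Int) (point : Int) : Int :=
  let g := bBuild time
  if g.1.contains point = false then -1
  else
    let fuel := (g.1.size + 1) ^ (g.1.size + 1)
    (PySem.List.pyRange 0 4).foldl (fun total target =>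
      match bDfs g.1 g.2 target fuel [(point, [point], 0)] none with
      | some b => if b > 0 then total + b else total
      | none => total) 0

-- ===== PRECONDITION & SPEC =====
-- Pre_ excludes edge rows with fewer than 3 entries (malformed edges with no weight):
-- A raises IndexError on them except in corners where the weight slot is never read,
-- and B, which reads every edge's weight up front, raises IndexError there.
def Pre_new_time (time : List (List Int)) (num : Int) (point : Int) : Prop :=
  ∀ row ∈ time, 3 ≤ row.length
instance (time : List (List Int)) (num : Int) (point : Int) : Decidable (Pre_new_time time num point) := by unfold Pre_new_time; infer_instance

def pvWitness_new_time : List (List Int) × Int × Int := ([[0, 1, 2], [1, 2, 3]], 0, 0)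

def Spec_new_time (time : List (List Int)) (num : Int) (point : Int) (out : Int) : Prop := out = new_time_alt time num point
instance (time : List (List Int)) (num : Int) (point : Int) (out : Int) : Decidable (Spec_new_time time num point out) := by unfold Spec_new_time; infer_instance

-- ===== CLAIM (what is proved, stated in full; the proofs are below) =====
def Claim_equal_new_time : Prop := ∀ (time : List (List Int)) (num : Int) (point : Int), Dom_new_time time num point → Pre_new_time time num point → Spec_new_time time num point (new_time time num point)

-- ===== LEMMAS AND PROOFS =====

-- semantic path weight: sum of dict weights of consecutive steps
def pathCost (w : PySem.Dict (Int × Int) Int) : List Int → Int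
  | x :: y :: rest => w.getD (x, y) 0 + pathCost w (y :: rest)
  | _ => 0

-- B's running-minimum update
def optMin (b : Option Int) (x : Int) : Option Int :=
  some (match b with | none => x | some y => if x < y then x else y)

-- the (key, weight) pairs of A's ribss/weight tables, in order
def pairsOf (time : List (List Int)) : List (List Int × Int) :=
  time.flatMap (fun pair =>
    let p0 := PySem.List.pyGetD pair 0 0
    let p1 := PySem.List.pyGetD pair 1 0
    let p2 := PySem.List.pyGetD pair 2 0
    [([p1, p0], p2), ([p0, p1], p2)])

lemma flag_fold (pts : List Int) (point : Int) : ∀ fl : Int,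
    pts.foldl (fun fl i => if i == point then (1 : Int) else fl) fl
      = if pts.contains point then 1 else fl := by
  induction pts with
  | nil => simp
  | cons a t ih =>
    intro fl
    simp only [List.foldl_cons, List.contains_cons]
    by_cases h : a == point
    · rw [ih]; simp [eq_of_beq h]
    · rw [ih]; have : ¬ point = a := fun e => by simp [e] at h
      simp [h, this]

lemma dict_get?_setdefault {κ ν : Type} [BEq κ] [LawfulBEq κ]
    (d : PySem.Dict κ ν) (k q : κ) (v : ν) :
    (d.setdefault k v).get? q = (d.get? q).or (if k == q then some v else none) := by
  unfold PySem.Dict.setdefault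
  by_cases hc : d.contains k
  · simp only [hc, if_true]
    by_cases hkq : k == q
    · have : d.contains q := by rwa [← eq_of_beq hkq]
      rw [PySem.Dict.contains_eq_isSome_get?] at this
      obtain ⟨x, hx⟩ := Option.isSome_iff_exists.mp this
      simp [hx, hkq]
    · simp [hkq]
  · simp only [hc, if_false]
    show (PySem.Dict.get? ⟨d.items ++ [(k, v)]⟩ q) = _
    unfold PySem.Dict.get?
    rw [List.find?_append]
    by_cases hkq : k == q <;>
      simp only [List.find?, hkq, Option.map_or, if_true, if_false, Option.map_some, Option.map_none] <;>
      cases List.find? (fun p => p.1 == q) d.items <;> simp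

lemma dict_keys_setdefault {κ ν : Type} [BEq κ] (d : PySem.Dict κ ν) (k : κ) (v : ν) :
    (d.setdefault k v).keys = if d.contains k then d.keys else d.keys ++ [k] := by
  unfold PySem.Dict.setdefault PySem.Dict.keys
  split <;> simp

lemma dict_keys_insert_of_contains {κ ν : Type} [BEq κ] [LawfulBEq κ]
    (d : PySem.Dict κ ν) (k : κ) (v : ν) (h : d.contains k = true) :
    (d.insert k v).keys = d.keys := by
  unfold PySem.Dict.insert PySem.Dict.keys
  simp only [h, if_true]
  rw [List.map_map]
  apply List.map_congr_left
  intro p _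
  by_cases hp : p.1 == k <;> simp [hp, eq_of_beq]
  · exact (eq_of_beq hp).symm

lemma set_ofList_concat {α : Type} [BEq α] (l : List α) (x : α) :
    PySem.Set.ofList (l ++ [x]) = PySem.Set.add (PySem.Set.ofList l) x := by
  simp [PySem.Set.ofList_eq_foldl, List.foldl_append]

lemma set_contains_ofList (l : List Int) (x : Int) :
    (PySem.Set.ofList l).contains x = l.contains x := by
  have h := PySem.Set.mem_ofList l x
  by_cases hx : x ∈ l
  · simp [PySem.Set.contains, hx, h.mpr hx]
  · have := fun hh => hx (h.mp hh)
    simp [PySem.Set.contains, hx, this]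

-- effect of A's append-to-adjacency step on lookups
lemma aAppend_getD (ar : PySem.Dict Int (List Int)) (a b n : Int) :
    (((if ar.contains a then ar else ar.insert a []).insert a
        ((if ar.contains a then ar else ar.insert a []).getD a [] ++ [b])).getD n [])
      = if n = a then ar.getD a [] ++ [b] else ar.getD n [] := by
  have h1 : (if ar.contains a then ar else ar.insert a []).getD a [] = ar.getD a [] := by
    by_cases hc : ar.contains a
    · simp [hc]
    · rw [if_neg hc]
      unfold PySem.Dict.getD
      rw [PySem.Dict.get?_insert_self]
      rw [PySem.Dict.contains_eq_isSome_get?] at hc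
      cases hg : ar.get? a with
      | none => simp
      | some x => rw [hg] at hc; simp at hc
  by_cases hn : n = a
  · subst hn
    unfold PySem.Dict.getD at h1 ⊢
    rw [PySem.Dict.get?_insert_self, if_pos rfl]
    simpa using h1
  · rw [if_neg hn]
    unfold PySem.Dict.getD
    rw [PySem.Dict.get?_insert_of_ne _ _ hn]
    by_cases hc : ar.contains a
    · rw [if_pos hc]
    · rw [if_neg hc, PySem.Dict.get?_insert_of_ne _ _ hn]

lemma dict_getD_setdefault_nil (adj : PySem.Dict Int (List Int)) (k q : Int) :
    (adj.setdefault k []).getD q [] = adj.getD q [] := by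
  unfold PySem.Dict.getD
  rw [dict_get?_setdefault]
  by_cases hkq : k == q <;> cases hg : adj.get? q <;> simp [hkq, hg]

lemma dict_contains_setdefault (adj : PySem.Dict Int (List Int)) (k q : Int) :
    (adj.setdefault k []).contains q = (adj.contains q || k == q) := by
  rw [PySem.Dict.contains_eq_isSome_get?, dict_get?_setdefault, PySem.Dict.contains_eq_isSome_get?]
  by_cases hkq : k == q <;> cases hg : adj.get? q <;> simp [hkq, hg]

-- B's per-direction adjacency update effect on getD
lemma bAppend_getD (adj : PySem.Dict Int (List Int)) (a b n : Int) :
    ((if (adj.getD a []).contains b then adj else adj.insert a (adj.getD a [] ++ [b])).getD n [])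
      = if n = a then PySem.Set.add (adj.getD a []) b else adj.getD n [] := by
  show _ = if n = a then (if (adj.getD a []).contains b then adj.getD a [] else adj.getD a [] ++ [b]) else _
  by_cases hc : (adj.getD a []).contains b
  · rw [if_pos hc, if_pos hc]
    by_cases hn : n = a
    · subst hn; rw [if_pos rfl]
    · rw [if_neg hn]
  · rw [if_neg hc, if_neg hc]
    by_cases hn : n = a
    · subst hn
      unfold PySem.Dict.getD
      rw [PySem.Dict.get?_insert_self, if_pos rfl]
      rfl
    · rw [if_neg hn]
      unfold PySem.Dict.getD
      rw [PySem.Dict.get?_insert_of_ne _ _ hn]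

lemma listContains_eq_decide (l : List Int) (x : Int) : l.contains x = decide (x ∈ l) := by
  by_cases h : x ∈ l <;> simp [h]

lemma dict_contains_keys (d : PySem.Dict Int (List Int)) (k : Int) :
    d.contains k = decide (k ∈ d.keys) := PySem.Dict.contains_eq_decide_mem_keys d k


-- one edge preserves the build invariants
lemma edge_inv (pair : List Int) (ar : PySem.Dict Int (List Int)) (pts : List Int)
    (adj : PySem.Dict Int (List Int)) (w : PySem.Dict (Int × Int) Int)
    (dp : List (List Int × Int))
    (hkeys : adj.keys = pts)
    (hadj : ∀ n, PySem.Set.ofList (ar.getD n []) = adj.getD n [])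
    (hw : ∀ u v : Int, (dp.find? (fun p => p.1 == [u, v])).map Prod.snd = w.get? (u, v)) :
    (bStepEdge (adj, w) pair).1.keys = (aStepEdge (ar, pts) pair).2 ∧
    (∀ n, PySem.Set.ofList ((aStepEdge (ar, pts) pair).1.getD n [])
        = (bStepEdge (adj, w) pair).1.getD n []) ∧
    (∀ u v : Int,
      ((dp ++ [([PySem.List.pyGetD pair 1 0, PySem.List.pyGetD pair 0 0], PySem.List.pyGetD pair 2 0),
               ([PySem.List.pyGetD pair 0 0, PySem.List.pyGetD pair 1 0], PySem.List.pyGetD pair 2 0)]).find?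
          (fun p => p.1 == [u, v])).map Prod.snd = (bStepEdge (adj, w) pair).2.get? (u, v)) := by
  simp only [aStepEdge, bStepEdge]
  set a := PySem.List.pyGetD pair 0 0 with ha
  set b := PySem.List.pyGetD pair 1 0 with hb
  set c := PySem.List.pyGetD pair 2 0 with hc
  -- abbreviations
  have hconta : adj.contains a = pts.contains a := by
    rw [dict_contains_keys, hkeys, listContains_eq_decide]
  set pts1 := if pts.contains a then pts else pts ++ [a] with hpts1
  set adj1 := adj.setdefault a [] with hadj1
  set adj2 := adj1.setdefault b [] with hadj2
  have hk1 : adj1.keys = pts1 := by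
    rw [hadj1, dict_keys_setdefault, hconta, hkeys, hpts1]
  have hk2 : adj2.keys = if pts1.contains b then pts1 else pts1 ++ [b] := by
    have hcb : adj1.contains b = pts1.contains b := by
      rw [dict_contains_keys, hk1, listContains_eq_decide]
    rw [hadj2, dict_keys_setdefault, hcb, hk1]
  set adj3 := if (adj2.getD a []).contains b then adj2 else adj2.insert a (adj2.getD a [] ++ [b]) with hadj3
  set adj4 := if (adj3.getD b []).contains a then adj3 else adj3.insert b (adj3.getD b [] ++ [a]) with hadj4
  have hca2 : adj2.contains a = true := by
    rw [hadj2, hadj1, dict_contains_setdefault, dict_contains_setdefault]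
    simp
  have hk3 : adj3.keys = adj2.keys := by
    rw [hadj3]
    split
    · rfl
    · exact dict_keys_insert_of_contains _ _ _ hca2
  have hcb3 : adj3.contains b = true := by
    rw [dict_contains_keys, hk3, ← dict_contains_keys, hadj2, dict_contains_setdefault]
    simp
  have hk4 : adj4.keys = adj3.keys := by
    rw [hadj4]
    split
    · rfl
    · exact dict_keys_insert_of_contains _ _ _ hcb3
  -- getD characterisations
  set ar1 := if ar.contains a then ar else ar.insert a [] with har1
  set ar2 := ar1.insert a (ar1.getD a [] ++ [b]) with har2
  have h2 : ∀ m, ar2.getD m [] = if m = a then ar.getD a [] ++ [b] else ar.getD m [] := by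
    intro m
    rw [har2, har1]
    exact aAppend_getD ar a b m
  have g2 : ∀ m, adj2.getD m [] = adj.getD m [] := by
    intro m
    rw [hadj2, hadj1, dict_getD_setdefault_nil, dict_getD_setdefault_nil]
  have g3 : ∀ m, adj3.getD m [] = if m = a then PySem.Set.add (adj.getD a []) b else adj.getD m [] := by
    intro m
    rw [hadj3, bAppend_getD adj2 a b m, g2, g2]
  have g4 : ∀ m, adj4.getD m []
      = if m = b then PySem.Set.add (adj3.getD b []) a else adj3.getD m [] := by
    intro m
    rw [hadj4]
    exact bAppend_getD adj3 b a m
  refine ⟨?_, ?_, ?_⟩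
  · -- keys
    rw [hk4, hk3, hk2]
  · -- adjacency lists
    intro n
    rw [aAppend_getD ar2 b a n, g4 n]
    by_cases hnb : n = b
    · rw [if_pos hnb, if_pos hnb, set_ofList_concat, h2, g3]
      by_cases hba : b = a
      · rw [if_pos hba, if_pos hba, hba, set_ofList_concat, hadj]
      · rw [if_neg hba, if_neg hba, hadj]
    · rw [if_neg hnb, if_neg hnb, h2, g3]
      by_cases hna : n = a
      · subst hna
        rw [if_pos rfl, if_pos rfl, set_ofList_concat, hadj]
      · rw [if_neg hna, if_neg hna, hadj]
  · -- weights
    have prodBeq : ∀ x y u v : Int, (((x, y) : Int × Int) == (u, v)) = (x == u && y == v) :=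
      fun _ _ _ _ => rfl
    intro u v
    rw [List.find?_append, Option.map_or, hw]
    rw [dict_get?_setdefault, dict_get?_setdefault]
    rw [Option.or_assoc]
    congr 1
    have eba : (([b, a] : List Int) == [u, v]) = (((b, a) : Int × Int) == (u, v)) := by
      by_cases h1 : b = u <;> by_cases h2 : a = v <;> simp [h1, h2, prodBeq]
    have eab : (([a, b] : List Int) == [u, v]) = (((a, b) : Int × Int) == (u, v)) := by
      by_cases h1 : a = u <;> by_cases h2 : b = v <;> simp [h1, h2, prodBeq]
    by_cases h1 : (((b, a) : Int × Int) == (u, v)) <;>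
      by_cases h2 : (((a, b) : Int × Int) == (u, v)) <;>
        simp [List.find?, eba, eab, h1, h2]


-- the build invariants, by induction along the edge list
lemma build_inv (ts : List (List Int)) : ∀ (ar : PySem.Dict Int (List Int)) (pts : List Int)
    (adj : PySem.Dict Int (List Int)) (w : PySem.Dict (Int × Int) Int)
    (dp : List (List Int × Int)),
    adj.keys = pts →
    (∀ n, PySem.Set.ofList (ar.getD n []) = adj.getD n []) →
    (∀ u v : Int, (dp.find? (fun p => p.1 == [u, v])).map Prod.snd = w.get? (u, v)) →
    (ts.foldl bStepEdge (adj, w)).1.keys = (ts.foldl aStepEdge (ar, pts)).2 ∧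
    (∀ n, PySem.Set.ofList ((ts.foldl aStepEdge (ar, pts)).1.getD n [])
        = (ts.foldl bStepEdge (adj, w)).1.getD n []) ∧
    (∀ u v : Int, ((dp ++ pairsOf ts).find? (fun p => p.1 == [u, v])).map Prod.snd
        = (ts.foldl bStepEdge (adj, w)).2.get? (u, v)) := by
  induction ts with
  | nil =>
    intro ar pts adj w dp h1 h2 h3
    exact ⟨h1, h2, by simpa [pairsOf] using h3⟩
  | cons e t ih =>
    intro ar pts adj w dp h1 h2 h3
    simp only [List.foldl_cons]
    obtain ⟨k1, k2, k3⟩ := edge_inv e ar pts adj w dp h1 h2 h3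
    have := ih (aStepEdge (ar, pts) e).1 (aStepEdge (ar, pts) e).2
      (bStepEdge (adj, w) e).1 (bStepEdge (adj, w) e).2
      (dp ++ [([PySem.List.pyGetD e 1 0, PySem.List.pyGetD e 0 0], PySem.List.pyGetD e 2 0),
              ([PySem.List.pyGetD e 0 0, PySem.List.pyGetD e 1 0], PySem.List.pyGetD e 2 0)])
      k1 k2 k3
    simpa [pairsOf, List.flatMap_cons, List.append_assoc] using this

-- index?-into-parallel-lists is find? on the zip
lemma index_zip (r : List (List Int)) (wt : List Int) (u v : Int)
    (h : r.length = wt.length) :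
    aScoreStep r wt u v = (((r.zip wt).find? (fun p => p.1 == [u, v])).map Prod.snd).getD 0 := by
  induction r generalizing wt with
  | nil => simp [aScoreStep, PySem.List.index?]
  | cons x r' ih =>
    cases wt with
    | nil => simp at h
    | cons w0 wt' =>
      simp only [List.length_cons, Nat.add_right_cancel_iff] at h
      by_cases hx : x == [u, v]
      · simp [aScoreStep, PySem.List.index?, List.idxOf?_cons, hx]
      · have hIH := ih wt' h
        rw [aScoreStep, PySem.List.index?, List.idxOf?_cons, if_neg hx]
        rw [List.zip_cons_cons, List.find?_cons_of_neg (by simpa using hx)]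
        rw [aScoreStep, PySem.List.index?] at hIH
        cases hj : List.idxOf? [u, v] r' with
        | none => rw [hj] at hIH; simpa using hIH
        | some j =>
          rw [hj] at hIH
          simp only [Option.map_some]
          rw [show ((j + 1 : Nat) : Int) = ((j : Int) + 1) by push_cast; ring] at *
          rw [show PySem.List.pyGetD (w0 :: wt') ((j:Int) + 1) 0 = PySem.List.pyGetD wt' (j:Int) 0 from ?_]
          · exact hIH
          · rw [show ((j:Int) + 1) = ((j + 1 : Nat) : Int) by push_cast; ring, PySem.List.pyGetD_natCast,
              PySem.List.pyGetD_natCast]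
            rfl

lemma aRibs_eq (time : List (List Int)) :
    aRibs time = (time.flatMap (fun pair => [[PySem.List.pyGetD pair 1 0, PySem.List.pyGetD pair 0 0],
                                             [PySem.List.pyGetD pair 0 0, PySem.List.pyGetD pair 1 0]]),
                  time.flatMap (fun pair => [PySem.List.pyGetD pair 2 0, PySem.List.pyGetD pair 2 0])) := by
  show List.foldl (fun rw pair =>
      (rw.1 ++ [[PySem.List.pyGetD pair 1 0, PySem.List.pyGetD pair 0 0],
                [PySem.List.pyGetD pair 0 0, PySem.List.pyGetD pair 1 0]],
       rw.2 ++ [PySem.List.pyGetD pair 2 0, PySem.List.pyGetD pair 2 0])) ([], []) time = _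
  rw [PySem.List.foldl_prod_mk
      (fun l pair => l ++ [[PySem.List.pyGetD pair 1 0, PySem.List.pyGetD pair 0 0],
                           [PySem.List.pyGetD pair 0 0, PySem.List.pyGetD pair 1 0]])
      (fun l pair => l ++ [PySem.List.pyGetD pair 2 0, PySem.List.pyGetD pair 2 0])]
  rw [PySem.List.foldl_append_eq_flatMap, PySem.List.foldl_append_eq_flatMap]
  simp

lemma aRibs_pairs (time : List (List Int)) :
    (aRibs time).1.zip (aRibs time).2 = pairsOf time ∧ (aRibs time).1.length = (aRibs time).2.length := by
  rw [aRibs_eq]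
  constructor
  · induction time with
    | nil => simp [pairsOf]
    | cons e t ih =>
      simp only [List.flatMap_cons, pairsOf] at *
      rw [List.zip_append (by simp)]
      simp [ih]
  · induction time with
    | nil => simp
    | cons e t ih => simp [List.flatMap_cons, ih]

-- pointwise: A's ribss.index scoring step is B's dict lookup
lemma scoreStep_eq (time : List (List Int)) (w : PySem.Dict (Int × Int) Int)
    (hfind : ∀ u v : Int, ((pairsOf time).find? (fun p => p.1 == [u, v])).map Prod.snd = w.get? (u, v))
    (u v : Int) :
    aScoreStep (aRibs time).1 (aRibs time).2 u v = w.getD (u, v) 0 := by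
  obtain ⟨hzip, hlen⟩ := aRibs_pairs time
  rw [index_zip _ _ _ _ hlen, hzip, hfind]
  rfl

-- A's per-path while-loop total is the semantic path weight
lemma pathCost_sum (w : PySem.Dict (Int × Int) Int) : ∀ (path : List Int),
    ((List.range (path.length - 1)).map
      (fun i => w.getD (path.getD i 0, path.getD (i + 1) 0) 0)).sum = pathCost w path := by
  intro path
  induction path with
  | nil => simp [pathCost]
  | cons x t ih =>
    cases t with
    | nil => simp [pathCost]
    | cons y t' =>
      simp only [List.length_cons, Nat.add_sub_cancel] at *
      rw [List.range_succ_eq_map]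
      simp only [List.map_cons, List.map_map, List.sum_cons]
      rw [pathCost]
      have hmap : ((List.range ((y :: t').length - 1)).map
          (fun i => ((fun i => PySem.Dict.getD w ((x :: y :: t').getD i 0, (x :: y :: t').getD (i + 1) 0) 0) ∘ Nat.succ) i))
          = (List.range ((y :: t').length - 1)).map
            (fun i => PySem.Dict.getD w ((y :: t').getD i 0, (y :: t').getD (i + 1) 0) 0) := by
        apply List.map_congr_left
        intro i _
        simp [Function.comp, Nat.succ_eq_add_one]
      simp only [List.length_cons, Nat.add_sub_cancel] at hmap
      rw [hmap, ih]
      simp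

lemma aScore_eq_pathCost (time : List (List Int)) (w : PySem.Dict (Int × Int) Int)
    (hstep : ∀ u v : Int, aScoreStep (aRibs time).1 (aRibs time).2 u v = w.getD (u, v) 0)
    (path : List Int) :
    aScore (aRibs time).1 (aRibs time).2 path = pathCost w path := by
  cases path with
  | nil =>
    show (PySem.List.pyRange 0 (PySem.List.len ([] : List Int) - 1)).foldl _ 0 = _
    rw [show PySem.List.len ([] : List Int) - 1 = -1 by simp [PySem.List.len]]
    rw [show PySem.List.pyRange 0 (-1) = [] from by decide]
    simp [pathCost]
  | cons x t =>
    unfold aScore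
    rw [show PySem.List.len (x :: t) - 1 = ((t.length : Nat) : Int) by
      simp [PySem.List.len]]
    rw [PySem.List.pyRange_zero_natCast, List.foldl_map]
    rw [PySem.List.foldl_add _ (fun i => aScoreStep (aRibs time).1 (aRibs time).2
        (PySem.List.pyGetD (x :: t) ((i : Nat) : Int) 0)
        (PySem.List.pyGetD (x :: t) (((i : Nat) : Int) + 1) 0)) 0]
    rw [zero_add]
    rw [show (List.range t.length).map (fun i => aScoreStep (aRibs time).1 (aRibs time).2
          (PySem.List.pyGetD (x :: t) ((i : Nat) : Int) 0)
          (PySem.List.pyGetD (x :: t) (((i : Nat) : Int) + 1) 0))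
        = (List.range ((x :: t).length - 1)).map
          (fun i => w.getD ((x :: t).getD i 0, (x :: t).getD (i + 1) 0) 0) from ?_]
    · exact pathCost_sum w (x :: t)
    · simp only [List.length_cons, Nat.add_sub_cancel]
      apply List.map_congr_left
      intro i _
      rw [show ((i : Nat) : Int) + 1 = ((i + 1 : Nat) : Int) by push_cast; ring]
      rw [PySem.List.pyGetD_natCast, PySem.List.pyGetD_natCast, hstep]

lemma pathCost_append (w : PySem.Dict (Int × Int) Int) (p : List Int) (n x : Int)
    (h : p.getLast? = some n) :
    pathCost w (p ++ [x]) = pathCost w p + w.getD (n, x) 0 := by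
  induction p generalizing n with
  | nil => simp at h
  | cons a t ih =>
    cases t with
    | nil =>
      simp only [List.getLast?_singleton, Option.some_inj] at h
      subst h
      simp [pathCost]
    | cons b t' =>
      rw [List.getLast?_cons_cons] at h
      have := ih n h
      simp only [List.cons_append, pathCost] at *
      omega

lemma optMin_fold_some (xs : List Int) : ∀ x : Int,
    xs.foldl optMin (some x) = some (xs.foldl (fun a y => if a > y then y else a) x) := by
  induction xs with
  | nil => intro x; simp
  | cons a t ih =>
    intro x
    simp only [List.foldl_cons]
    rw [show optMin (some x) a = some (if x > a then a else x) from rfl]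
    rw [ih]

-- the inner neighbour loops advance in lockstep
lemma inner_lockstep (w : PySem.Dict (Int × Int) Int) (target n : Int) (p : List Int)
    (hp : p.getLast? = some n) (l : List Int) :
    ∀ (restA : List (Int × List Int)) (acc : List (List Int)) (best : Option Int),
    (l.foldl (fun sb nxt =>
        if p.contains nxt then sb
        else
          if nxt == target then
            (sb.1, some (match sb.2 with
              | none => pathCost w p + w.getD (n, nxt) 0
              | some b0 => if pathCost w p + w.getD (n, nxt) 0 < b0
                           then pathCost w p + w.getD (n, nxt) 0 else b0))
          else (sb.1 ++ [(nxt, p ++ [nxt], pathCost w p + w.getD (n, nxt) 0)], sb.2))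
      (restA.map (fun e => (e.1, e.2, pathCost w e.2)),
       acc.foldl (fun b q => optMin b (pathCost w q)) best))
    = ((l.foldl (fun sa nxt =>
          if (!p.contains nxt) = true then
            (if nxt == target then (sa.1, sa.2 ++ [p ++ [nxt]])
             else (sa.1 ++ [(nxt, p ++ [nxt])], sa.2))
          else sa) (restA, acc)).1.map (fun e => (e.1, e.2, pathCost w e.2)),
       ((l.foldl (fun sa nxt =>
          if (!p.contains nxt) = true then
            (if nxt == target then (sa.1, sa.2 ++ [p ++ [nxt]])
             else (sa.1 ++ [(nxt, p ++ [nxt])], sa.2))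
          else sa) (restA, acc)).2).foldl (fun b q => optMin b (pathCost w q)) best) := by
  induction l with
  | nil => intro restA acc best; rfl
  | cons x l' ih =>
    intro restA acc best
    simp only [List.foldl_cons]
    by_cases hx : p.contains x
    · rw [if_pos hx, if_neg (show ¬((!p.contains x) = true) by rw [hx]; simp)]
      exact ih restA acc best
    · have hx' : p.contains x = false := by simpa using hx
      rw [if_neg hx, if_pos (show (!p.contains x) = true by rw [hx']; rfl)]
      by_cases ht : x == target
      · rw [if_pos ht, if_pos ht]
        have hstep : (some (match acc.foldl (fun b q => optMin b (pathCost w q)) best with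
            | none => pathCost w p + w.getD (n, x) 0
            | some b0 => if pathCost w p + w.getD (n, x) 0 < b0 then pathCost w p + w.getD (n, x) 0 else b0) : Option Int)
            = (acc ++ [p ++ [x]]).foldl (fun b q => optMin b (pathCost w q)) best := by
          rw [List.foldl_append, List.foldl_cons, List.foldl_nil, pathCost_append w p n x hp]
          rfl
        rw [hstep]
        exact ih restA (acc ++ [p ++ [x]]) best
      · rw [if_neg ht, if_neg ht]
        have hpush : (restA.map (fun e => (e.1, e.2, pathCost w e.2)) ++ [(x, p ++ [x], pathCost w p + w.getD (n, x) 0)])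
            = (restA ++ [(x, p ++ [x])]).map (fun e => (e.1, e.2, pathCost w e.2)) := by
          rw [List.map_append, List.map_cons, List.map_nil, pathCost_append w p n x hp]
        rw [hpush]
        exact ih (restA ++ [(x, p ++ [x])]) acc best

-- every stack entry the A-loop keeps is an old entry or a pushed extension
lemma inner_entries (target : Int) (p : List Int) (l : List Int) :
    ∀ (restA : List (Int × List Int)) (acc : List (List Int)) (e : Int × List Int),
    e ∈ (l.foldl (fun sa nxt =>
          if (!p.contains nxt) = true then
            (if nxt == target then (sa.1, sa.2 ++ [p ++ [nxt]])
             else (sa.1 ++ [(nxt, p ++ [nxt])], sa.2))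
          else sa) (restA, acc)).1 →
    e ∈ restA ∨ ∃ nxt, e = (nxt, p ++ [nxt]) := by
  induction l with
  | nil => intro restA acc e he; exact Or.inl he
  | cons x l' ih =>
    intro restA acc e he
    simp only [List.foldl_cons] at he
    by_cases hx : p.contains x
    · rw [if_neg (show ¬((!p.contains x) = true) by rw [hx]; simp)] at he
      exact ih restA acc e he
    · have hx' : p.contains x = false := by simpa using hx
      rw [if_pos (show (!p.contains x) = true by rw [hx']; rfl)] at he
      by_cases ht : x == target
      · rw [if_pos ht] at he
        exact ih restA (acc ++ [p ++ [x]]) e he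
      · rw [if_neg ht] at he
        rcases ih (restA ++ [(x, p ++ [x])]) acc e he with hmem | hex
        · rcases List.mem_append.mp hmem with h | h
          · exact Or.inl h
          · exact Or.inr ⟨x, by simpa using h⟩
        · exact Or.inr hex

-- the two DFS loops agree step for step
lemma dfs_lockstep (ar adj : PySem.Dict Int (List Int)) (w : PySem.Dict (Int × Int) Int)
    (hadj : ∀ nd, PySem.Set.ofList (ar.getD nd []) = adj.getD nd []) (target : Int) :
    ∀ (fuel : Nat) (stackA : List (Int × List Int)) (acc : List (List Int)) (best : Option Int),
    (∀ e ∈ stackA, e.2.getLast? = some e.1) →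
    bDfs adj w target fuel (stackA.map (fun e => (e.1, e.2, pathCost w e.2)))
        (acc.foldl (fun b q => optMin b (pathCost w q)) best)
      = (aDfs ar target fuel stackA acc).foldl (fun b q => optMin b (pathCost w q)) best := by
  intro fuel
  induction fuel with
  | zero => intro stackA acc best hwf; rfl
  | succ fuel ih =>
    intro stackA acc best hwf
    cases hlast : stackA.getLast? with
    | none =>
      have hnil : stackA = [] := List.getLast?_eq_none_iff.mp hlast
      subst hnil
      simp [aDfs, bDfs]
    | some e =>
      obtain ⟨nd, pth⟩ := e
      have hwfe : pth.getLast? = some nd := hwf (nd, pth) (List.mem_of_getLast? hlast)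
      have hlastB : (stackA.map (fun e => (e.1, e.2, pathCost w e.2))).getLast?
          = some (nd, pth, pathCost w pth) := by
        rw [List.getLast?_map, hlast]; rfl
      rw [aDfs, bDfs, hlast, hlastB]
      simp only []
      rw [← List.map_dropLast]
      rw [show PySem.Set.diff (PySem.Set.ofList (ar.getD nd [])) (PySem.Set.ofList pth)
          = (adj.getD nd []).filter (fun x => !pth.contains x) from ?_]
      · rw [List.foldl_filter]
        rw [inner_lockstep w target nd pth hwfe (adj.getD nd []) stackA.dropLast acc best]
        apply ih
        intro e' he'
        rcases inner_entries target pth (adj.getD nd []) stackA.dropLast acc e' he' with hmem | ⟨nxt, rfl⟩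
        · exact hwf e' ((List.dropLast_sublist stackA).subset hmem)
        · simp
      · rw [PySem.Set.diff.eq_def, hadj nd]
        apply List.filter_congr
        intro x _
        rw [set_contains_ofList]

-- per-target: B's fused loop contributes exactly what A's short_path result contributes
lemma contrib_eq (time : List (List Int)) (ar adj : PySem.Dict Int (List Int))
    (w : PySem.Dict (Int × Int) Int)
    (hadj : ∀ nd, PySem.Set.ofList (ar.getD nd []) = adj.getD nd [])
    (hstep : ∀ u v : Int, aScoreStep (aRibs time).1 (aRibs time).2 u v = w.getD (u, v) 0)
    (fuel : Nat) (start target total : Int) :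
    (match bDfs adj w target fuel [(start, [start], 0)] none with
     | some b => if b > 0 then total + b else total
     | none => total)
    = (if aShortPath time ar fuel start target > 0
       then total + aShortPath time ar fuel start target else total) := by
  have hB : bDfs adj w target fuel [(start, [start], 0)] none
      = (aDfs ar target fuel [(start, [start])] []).foldl
          (fun b q => optMin b (pathCost w q)) none := by
    have h := dfs_lockstep ar adj w hadj target fuel [(start, [start])] [] none
      (by intro e he; simp at he; subst he; rfl)
    simpa [pathCost] using h
  rw [hB]
  unfold aShortPath
  cases happ : aDfs ar target fuel [(start, [start])] [] with
  | nil => simp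
  | cons q qs =>
    simp only [List.cons_ne_nil, if_false]
    -- min_p is the list of path scores, i.e. of semantic path costs
    have hmin : (q :: qs).foldl (fun mp path => mp ++ [aScore (aRibs time).1 (aRibs time).2 path]) []
        = (q :: qs).map (pathCost w) := by
      rw [PySem.List.foldl_append_singleton_eq_map (aScore (aRibs time).1 (aRibs time).2) (q :: qs) []]
      simp only [List.nil_append]
      exact List.map_congr_left (fun path _ => aScore_eq_pathCost time w hstep path)
    rw [hmin]
    -- A's indexed min loop over min_p is a fold over the list itself
    rw [PySem.List.foldl_pyRange_pyGetD ((q :: qs).map (pathCost w)) 0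
      (fun a x => if a > x then x else a) _ (le_refl 0)]
    simp only [Int.toNat_zero, List.drop_zero, List.map_cons]
    -- B's fused fold is the same minimum
    rw [show ((q :: qs).foldl (fun b p => optMin b (pathCost w p)) none)
        = ((q :: qs).map (pathCost w)).foldl optMin none from Eq.symm List.foldl_map]
    simp only [List.map_cons, List.foldl_cons]
    rw [show optMin none (pathCost w q) = some (pathCost w q) from rfl]
    rw [optMin_fold_some]
    have hfirst : PySem.List.pyGetD (pathCost w q :: List.map (pathCost w) qs) 0 0 = pathCost w q := by
      rw [show (0 : Int) = ((0 : Nat) : Int) from rfl, PySem.List.pyGetD_natCast]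
      rfl
    rw [hfirst]
    rw [show (if pathCost w q > pathCost w q then pathCost w q else pathCost w q) = pathCost w q by simp]

-- ===== VERDICT (by name: the statement is the Claim_ definition above) =====
theorem new_time_spec : Claim_equal_new_time := by
  intro time num point _hdom _hpre
  unfold Spec_new_time
  obtain ⟨hkeys, hadj, hfind⟩ := build_inv time PySem.Dict.empty [] PySem.Dict.empty PySem.Dict.empty []
    rfl (fun n => rfl) (fun u v => rfl)
  simp only [List.nil_append] at hfind
  have hstep' := scoreStep_eq time (time.foldl bStepEdge (PySem.Dict.empty, PySem.Dict.empty)).2 hfind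
  simp only [new_time, new_time_alt, aBuild, bBuild]
  have hcont : (time.foldl bStepEdge (PySem.Dict.empty, PySem.Dict.empty)).1.contains point
      = (time.foldl aStepEdge (PySem.Dict.empty, [])).2.contains point := by
    rw [dict_contains_keys, hkeys, listContains_eq_decide]
  rw [flag_fold, hcont]
  by_cases hpt : (time.foldl aStepEdge (PySem.Dict.empty, [])).2.contains point
  · rw [if_pos hpt, if_neg (by norm_num), if_neg (by simp; exact (by simpa using hpt))]
    have hsize : (time.foldl bStepEdge (PySem.Dict.empty, PySem.Dict.empty)).1.size
        = (time.foldl aStepEdge (PySem.Dict.empty, [])).2.length := by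
      have : (time.foldl bStepEdge (PySem.Dict.empty, PySem.Dict.empty)).1.size
          = (time.foldl bStepEdge (PySem.Dict.empty, PySem.Dict.empty)).1.keys.length := by
        simp [PySem.Dict.size, PySem.Dict.keys]
      rw [this, hkeys]
    rw [hsize]
    have hbody : ∀ (total target : Int),
        (match bDfs (time.foldl bStepEdge (PySem.Dict.empty, PySem.Dict.empty)).1
            (time.foldl bStepEdge (PySem.Dict.empty, PySem.Dict.empty)).2 target
            (((time.foldl aStepEdge (PySem.Dict.empty, [])).2.length + 1)
              ^ ((time.foldl aStepEdge (PySem.Dict.empty, [])).2.length + 1))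
            [(point, [point], 0)] none with
         | some b => if b > 0 then total + b else total
         | none => total)
        = (if aShortPath time (time.foldl aStepEdge (PySem.Dict.empty, [])).1
              (((time.foldl aStepEdge (PySem.Dict.empty, [])).2.length + 1)
                ^ ((time.foldl aStepEdge (PySem.Dict.empty, [])).2.length + 1)) point target > 0
           then total + aShortPath time (time.foldl aStepEdge (PySem.Dict.empty, [])).1
              (((time.foldl aStepEdge (PySem.Dict.empty, [])).2.length + 1)
                ^ ((time.foldl aStepEdge (PySem.Dict.empty, [])).2.length + 1)) point target
           else total) :=
      fun total target => contrib_eq time _ _ _ hadj hstep' _ point target total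
    exact List.foldl_ext _ _ 0 (fun acc x _ => (hbody acc x).symm)
  · rw [if_neg hpt, if_pos rfl, if_pos (by simpa using hpt)]
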